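-- pv_equiv track=rewrite | github.com/possible055/relace-mcp | src/relace_mcp/tools/search/_impl/bash_security.py | _has_variable_expansion
-- ===== SOURCE A (Python) =====
-- def _has_variable_expansion(command: str) -> bool:
--     """Return True if command contains a `$` that bash would expand.
--
--     This is a defense-in-depth guard for the `bash` tool. Shell variable expansion can be used
--     to synthesize absolute paths or bypass token-level path checks (e.g., `${HOME%/*}`).
--
--     Rules:
--     - `$` inside single quotes is not expanded by bash.
--     - Escaped `$` (e.g., `\\$HOME`) is treated as literal.
--     - `$` inside double quotes is still expanded and is blocked.
--     """
--     in_single = False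
--     in_double = False
--     escaped = False
--
--     for ch in command:
--         if escaped:
--             escaped = False
--             continue
--
--         # Backslash escapes outside single quotes (including inside double quotes).
--         if not in_single and ch == "\\":  # nosec B105 - escape char
--             escaped = True
--             continue
--
--         # Single quotes are only special outside double quotes.
--         if ch == "'" and not in_double:  # nosec B105 - quote char
--             in_single = not in_single
--             continue
--
--         # Double quotes are only special outside single quotes.
--         if ch == '"' and not in_single:  # nosec B105 - quote char
--             in_double = not in_double
--             continue
--
--         if ch == "$" and not in_single:  # nosec B105 - shell sigil
--             return True
--
--     return False
-- ===== SOURCE B (Python) =====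
-- def _has_variable_expansion(command: str) -> bool:
--     in_double = False
--     i = 0
--     n = len(command)
--     while i < n:
--         c = command[i]
--         if c == "\\":
--             i += 2  # skip the escaped character (also inside double quotes)
--         elif c == "'" and not in_double:
--             j = command.find("'", i + 1)
--             if j == -1:
--                 return False  # unterminated single quote: rest is literal
--             i = j + 1  # jump past the single-quoted segment
--         elif c == '"':
--             in_double = not in_double
--             i += 1
--         elif c == "$":
--             return True
--         else:
--             i += 1
--     return False
-- ===== Notes on version B (the rewrite author's own statement) =====
-- stated objective: simpler
-- what changed: Replaced the three-flag (in_single/in_double/escaped) per-character state machine with an index-based scanner keeping only an in_double flag: backslash skips two positions, and a single-quoted segment is jumped over in one step via str.find of the closing quote.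
import Mathlib
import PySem

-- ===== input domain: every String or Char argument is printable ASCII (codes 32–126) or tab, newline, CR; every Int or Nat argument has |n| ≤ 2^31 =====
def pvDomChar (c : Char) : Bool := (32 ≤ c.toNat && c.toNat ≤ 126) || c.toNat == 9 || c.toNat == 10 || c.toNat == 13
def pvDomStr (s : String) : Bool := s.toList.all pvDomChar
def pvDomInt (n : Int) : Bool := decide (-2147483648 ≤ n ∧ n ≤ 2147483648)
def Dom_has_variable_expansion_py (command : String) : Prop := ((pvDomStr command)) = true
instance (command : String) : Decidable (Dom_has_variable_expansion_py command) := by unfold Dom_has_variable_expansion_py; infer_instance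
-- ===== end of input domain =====

-- B replaces A's three-flag per-character state machine by an index/segment scanner with a
-- single in_double flag that jumps over single-quoted segments via str.find (objective: simpler).

-- ===== PORT A =====
-- A's for-loop over the characters with state (in_single, in_double, escaped) and early return.
def hveALoop : List Char → Bool → Bool → Bool → Bool
  | [], _, _, _ => false
  | ch :: rest, insg, indb, esc =>
    if esc then hveALoop rest insg indb false
    else if !insg && ch = '\\' then hveALoop rest insg indb true
    else if ch = '\'' && !indb then hveALoop rest (!insg) indb false
    else if ch = '"' && !insg then hveALoop rest insg (!indb) false
    else if ch = '$' && !insg then true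
    else hveALoop rest insg indb false

def has_variable_expansion_py (command : String) : Bool :=
  hveALoop command.toList false false false

-- ===== PORT B =====
-- predicate for str.find: scan until the closing single quote
def hveNotQ (c : Char) : Bool := c ≠ '\''
-- B's while-loop: on '\\' skip two chars; on a single quote (outside double quotes) jump past
-- the segment found by command.find("'", i+1) (here: dropWhile on the rest of the list).
def hveBLoop : List Char → Bool → Bool
  | [], _ => false
  | c :: rest, indb =>
    if c = '\\' then hveBLoop (rest.drop 1) indb
    else if c = '\'' && !indb then
      -- command.find("'", i+1); -1 ⇒ False, else resume right after the closing quote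
      if (rest.dropWhile hveNotQ).isEmpty then false
      else hveBLoop (rest.dropWhile hveNotQ).tail indb
    else if c = '"' then hveBLoop rest (!indb)
    else if c = '$' then true
    else hveBLoop rest indb
termination_by l _ => l.length
decreasing_by
  · simp
  · have := List.length_dropWhile_le (p := hveNotQ) (l := rest)
    simp [List.length_tail]; omega
  · simp
  · simp

def has_variable_expansion_py_alt (command : String) : Bool :=
  hveBLoop command.toList false

-- ===== PRECONDITION & SPEC =====
def Spec_has_variable_expansion_py (command : String) (out : Bool) : Prop := out = has_variable_expansion_py_alt command
instance (command : String) (out : Bool) : Decidable (Spec_has_variable_expansion_py command out) := by unfold Spec_has_variable_expansion_py; infer_instance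

-- ===== CLAIM (what is proved, stated in full; the proofs are below) =====
def Claim_equal_has_variable_expansion_py : Prop := ∀ (command : String), Dom_has_variable_expansion_py command → Spec_has_variable_expansion_py command (has_variable_expansion_py command)

-- ===== LEMMAS AND PROOFS =====

-- Inside single quotes, A scans literally until the closing quote (none ⇒ false).
theorem hveALoop_single (l : List Char) :
    hveALoop l true false false =
      (match l.dropWhile hveNotQ with
       | [] => false
       | _ :: r => hveALoop r false false false) := by
  induction l with
  | nil => simp [hveALoop]
  | cons c rest ih =>
    by_cases hc : c = '\''
    · subst hc; simp [hveALoop, List.dropWhile, hveNotQ]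
    · simp [hveALoop, hc, List.dropWhile, hveNotQ, ih]

theorem hveLoop_eq (n : Nat) : ∀ (l : List Char) (db : Bool), l.length ≤ n →
    hveALoop l false db false = hveBLoop l db := by
  induction n with
  | zero =>
    intro l db hl
    have : l = [] := by cases l <;> simp_all
    subst this; simp [hveALoop, hveBLoop]
  | succ n ih =>
    intro l db hl
    cases l with
    | nil => simp [hveALoop, hveBLoop]
    | cons c rest =>
      have hr : rest.length ≤ n := by simp at hl; omega
      by_cases hbs : c = '\\'
      · subst hbs
        cases rest with
        | nil => simp [hveALoop, hveBLoop]
        | cons x r =>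
          have : r.length ≤ n := by simp at hr ⊢; omega
          simp [hveALoop, hveBLoop, ih r db this]
      · by_cases hq : c = '\''
        · subst hq
          cases db with
          | false =>
            cases hdw : rest.dropWhile hveNotQ with
            | nil => simp [hveALoop, hveBLoop, hveALoop_single, hdw]
            | cons x r =>
              have hlen := List.length_dropWhile_le (p := hveNotQ) (l := rest)
              rw [hdw] at hlen; simp at hlen
              have hx := ih r false (by omega)
              simp [hveALoop, hveBLoop, hveALoop_single, hdw, hx]
          | true => simp [hveALoop, hveBLoop, ih rest true hr]
        · by_cases hdq : c = '"'
          · subst hdq; simp [hveALoop, hveBLoop, ih rest (!db) hr]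
          · by_cases hd : c = '$'
            · subst hd; simp [hveALoop, hveBLoop]
            · simp [hveALoop, hveBLoop, hbs, hq, hdq, hd, ih rest db hr]

-- ===== VERDICT (by name: the statement is the Claim_ definition above) =====
theorem has_variable_expansion_py_spec : Claim_equal_has_variable_expansion_py := by
  intro command _
  unfold Spec_has_variable_expansion_py has_variable_expansion_py has_variable_expansion_py_alt
  exact hveLoop_eq command.toList.length command.toList false le_rfl
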